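-- pv_equiv track=rewrite | github.com/AEzamar/python-learning | list_parity.py | solve
-- ===== SOURCE A (Python) =====
-- def solve(arr):
--     positive_lst = sorted(filter(lambda item: item > 0, arr))
--     negative_lst = sorted(filter(lambda item: item < 0, arr))
--     for i in range(len(arr)):
--         if len(positive_lst) > len(negative_lst):
--             if -abs(positive_lst[i]) not in negative_lst:
--                 return positive_lst[i]
--         if len(negative_lst) > len(positive_lst):
--             if abs(negative_lst[i]) not in positive_lst:
--                 return negative_lst[i]
-- ===== SOURCE B (Python) =====
-- def solve(arr):
--     pos = [x for x in arr if x > 0]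
--     neg = [x for x in arr if x < 0]
--     if len(pos) > len(neg):
--         nset = set(neg)
--         return min(p for p in pos if -p not in nset)
--     if len(neg) > len(pos):
--         pset = set(pos)
--         return min(n for n in neg if -n not in pset)
--     return None
-- ===== Notes on version B (the rewrite author's own statement) =====
-- stated objective: alternative
-- what changed: Instead of sorting both sides and scanning sorted positions with a linear 'not in' list test inside the loop, B skips sorting entirely, builds a hash set of the minority side once and returns the minimum unmatched element of the majority side in one pass.
import Mathlib
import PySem

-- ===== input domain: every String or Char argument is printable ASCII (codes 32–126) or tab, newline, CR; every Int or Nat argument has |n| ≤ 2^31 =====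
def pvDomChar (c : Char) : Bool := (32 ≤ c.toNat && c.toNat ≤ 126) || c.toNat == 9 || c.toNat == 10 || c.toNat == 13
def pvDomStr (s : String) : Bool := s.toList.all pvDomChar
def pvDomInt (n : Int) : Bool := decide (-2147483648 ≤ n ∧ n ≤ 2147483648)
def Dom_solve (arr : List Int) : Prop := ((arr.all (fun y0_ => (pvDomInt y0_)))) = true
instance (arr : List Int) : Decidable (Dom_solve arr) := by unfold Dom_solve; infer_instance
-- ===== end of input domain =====

-- B builds a set of the minority-sign values once and takes the minimum unmatched
-- element of the majority side in one pass, instead of A's sort + indexed scan with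
-- a linear membership test (objective: alternative single-pass algorithm).

-- ===== PORT A =====
-- the 'for i in range(len(arr))' loop; a pyGet? failure (Python's IndexError) yields
-- none here — such inputs are excluded by Pre_solve.
def solveLoopA (pos neg : List Int) : List Int → Option Int
  | [] => none
  | i :: rest =>
    if pos.length > neg.length then
      match PySem.List.pyGet? pos i with
      | none => none  -- IndexError in Python; outside Pre_solve
      | some p => if neg.contains (-|p|) = false then some p else solveLoopA pos neg rest
    else if neg.length > pos.length then
      match PySem.List.pyGet? neg i with
      | none => none  -- IndexError in Python; outside Pre_solve
      | some q => if pos.contains |q| = false then some q else solveLoopA pos neg rest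
    else solveLoopA pos neg rest

def solve (arr : List Int) : Option Int :=
  -- positive_lst, negative_lst
  solveLoopA (PySem.List.sorted (arr.filter (fun item => decide (item > 0))) (fun x => x) false)
             (PySem.List.sorted (arr.filter (fun item => decide (item < 0))) (fun x => x) false)
             (PySem.List.pyRange 0 arr.length 1)

-- ===== PORT B =====
-- min(generator) raises ValueError on an empty generator in Python; min? returns
-- none there — such inputs are outside Pre_solve.
def solveHalfB (major minor : List Int) : Option Int :=
  -- 'xset = set(minor); min(x for x in major if -x not in xset)' (min of an empty
  -- generator raises ValueError in Python; min? is none there — outside Pre_solve)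
  PySem.List.min?
    (major.filter (fun x => !(PySem.Set.contains (PySem.Set.ofList minor) (-x))))
    (fun x => x)

def solve_alt (arr : List Int) : Option Int :=
  -- pos, neg
  if (arr.filter (fun x => decide (x > 0))).length > (arr.filter (fun x => decide (x < 0))).length then
    solveHalfB (arr.filter (fun x => decide (x > 0))) (arr.filter (fun x => decide (x < 0)))
  else if (arr.filter (fun x => decide (x < 0))).length > (arr.filter (fun x => decide (x > 0))).length then
    solveHalfB (arr.filter (fun x => decide (x < 0))) (arr.filter (fun x => decide (x > 0)))
  else none

-- ===== PRECONDITION & SPEC =====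
-- Pre_ excludes exactly the inputs on which Python A raises IndexError (and B raises
-- ValueError): a strict-majority sign side all of whose elements have their negation
-- present on the other side (only possible with duplicates).
def Pre_solve (arr : List Int) : Prop :=
  let pos := arr.filter (fun x => decide (x > 0))
  let neg := arr.filter (fun x => decide (x < 0))
  (pos.length > neg.length ∧ ∃ p ∈ pos, (-p) ∉ neg) ∨
  (neg.length > pos.length ∧ ∃ n ∈ neg, (-n) ∉ pos) ∨
  pos.length = neg.length
instance (arr : List Int) : Decidable (Pre_solve arr) := by unfold Pre_solve; infer_instance

def pvWitness_solve : List Int := [3, -1, 1, -3, 2]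

def Spec_solve (arr : List Int) (out : Option Int) : Prop := out = solve_alt arr
instance (arr : List Int) (out : Option Int) : Decidable (Spec_solve arr out) := by unfold Spec_solve; infer_instance

-- ===== CLAIM (what is proved, stated in full; the proofs are below) =====
def Claim_equal_solve : Prop := ∀ (arr : List Int), Dom_solve arr → Pre_solve arr → Spec_solve arr (solve arr)

-- ===== LEMMAS AND PROOFS =====

-- find? on a (≤)-sorted list returns a least satisfying element
theorem find?_sorted_isMin {q : Int → Bool} {s : List Int} (hs : s.Pairwise (· ≤ ·))
    {m : Int} (h : s.find? q = some m) :
    q m = true ∧ m ∈ s ∧ ∀ x ∈ s, q x = true → m ≤ x := by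
  induction s with
  | nil => simp at h
  | cons a t ih =>
    rcases List.pairwise_cons.mp hs with ⟨ha, ht⟩
    by_cases hqa : q a = true
    · rw [List.find?_cons_of_pos hqa] at h
      obtain rfl : a = m := by injection h
      refine ⟨hqa, List.mem_cons_self, ?_⟩
      intro x hx _
      rcases List.mem_cons.mp hx with rfl | hx
      · exact le_refl _
      · exact ha x hx
    · rw [List.find?_cons_of_neg hqa] at h
      obtain ⟨h1, h2, h3⟩ := ih ht h
      refine ⟨h1, List.mem_cons_of_mem _ h2, ?_⟩
      intro x hx hqx
      rcases List.mem_cons.mp hx with rfl | hx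
      · exact absurd hqx hqa
      · exact h3 x hx hqx

-- find? of a sorted copy of l equals min? of the filtered l (both name the same minimum value)
theorem find?_sorted_eq_min?_filter (l : List Int) (q : Int → Bool) :
    (PySem.List.sorted l (fun x => x) false).find? q
      = PySem.List.min? (l.filter q) (fun x => x) := by
  set s := PySem.List.sorted l (fun x => x) false with hsdef
  have hperm : s.Perm l := PySem.List.sorted_perm l (fun x => x) false
  have hpw : s.Pairwise (· ≤ ·) := by
    simpa using PySem.List.sorted_pairwise l (fun x => x)
  cases hf : s.find? q with
  | none =>
    have hnone : ∀ x ∈ s, ¬ q x = true := List.find?_eq_none.mp hf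
    have : l.filter q = [] := by
      rw [List.filter_eq_nil_iff]
      intro x hx
      exact hnone x (hperm.mem_iff.mpr hx)
    rw [this]
    simp [PySem.List.min?]
  | some m =>
    obtain ⟨hqm, hms, hmin⟩ := find?_sorted_isMin hpw hf
    have hmfil : m ∈ l.filter q := List.mem_filter.mpr ⟨hperm.mem_iff.mp hms, hqm⟩
    cases hm2 : PySem.List.min? (l.filter q) (fun x => x) with
    | none =>
      rw [PySem.List.min?_eq_none_iff] at hm2
      rw [hm2] at hmfil
      simp at hmfil
    | some m2 =>
      have hm2mem : m2 ∈ l.filter q := PySem.List.min?_mem hm2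
      have hm2min : ∀ y ∈ l.filter q, m2 ≤ y := by
        intro y hy
        simpa using PySem.List.min?_isMin hm2 y hy
      obtain ⟨hm2l, hqm2⟩ := List.mem_filter.mp hm2mem
      have h1 : m ≤ m2 := hmin m2 (hperm.mem_iff.mpr hm2l) hqm2
      have h2 : m2 ≤ m := hm2min m hmfil
      rw [le_antisymm h1 h2]

-- find? is determined by the predicate's values on members
theorem find?_congr_mem {q q' : Int → Bool} : ∀ {s : List Int},
    (∀ x ∈ s, q x = q' x) → s.find? q = s.find? q' := by
  intro s
  induction s with
  | nil => intro _; rfl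
  | cons a t ih =>
    intro h
    have ha := h a List.mem_cons_self
    by_cases hqa : q a = true
    · rw [List.find?_cons_of_pos hqa, List.find?_cons_of_pos (ha ▸ hqa)]
    · rw [List.find?_cons_of_neg hqa, List.find?_cons_of_neg (fun c => hqa (ha ▸ c))]
      exact ih (fun x hx => h x (List.mem_cons_of_mem _ hx))

-- the indexed for-loop of A, in the active-majority branch, is find? on the sorted list
theorem solveLoopA_pos (pos neg : List Int) (hgt : pos.length > neg.length) :
    ∀ (k n : Nat), pos.length ≤ n →
    solveLoopA pos neg (PySem.List.pyRange (k : Int) (n : Int) 1)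
      = (pos.drop k).find? (fun p => !(neg.contains (-|p|))) := by
  intro k n
  induction hd : n - k generalizing k with
  | zero =>
    intro hn
    have hkn : (n : Int) ≤ (k : Int) := by omega
    rw [PySem.List.pyRange_one_eq_nil hkn]
    have : pos.drop k = [] := List.drop_eq_nil_of_le (by omega)
    rw [this]
    rfl
  | succ d ih =>
    intro hn
    have hkn : (k : Int) < (n : Int) := by omega
    rw [PySem.List.pyRange_one_cons hkn]
    show (if pos.length > neg.length then _ else _) = _
    rw [if_pos hgt]
    by_cases hk : k < pos.length
    · have hget : PySem.List.pyGet? pos (k : Int) = some pos[k] := by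
        rw [PySem.List.pyGet?_natCast]
        exact List.getElem?_eq_getElem hk
      rw [hget]
      have hdrop : pos.drop k = pos[k] :: pos.drop (k + 1) := List.drop_eq_getElem_cons hk
      rw [hdrop]
      show (if neg.contains (-|pos[k]|) = false then some pos[k]
            else solveLoopA pos neg (PySem.List.pyRange ((k : Int) + 1) (n : Int) 1)) = _
      by_cases hc : neg.contains (-|pos[k]|) = true
      · have hm : (-|pos[k]|) ∈ neg := by simpa using hc
        rw [if_neg (by simp [hm]), List.find?_cons_of_neg (by simp [hm])]
        have : ((k : Int) + 1) = ((k + 1 : Nat) : Int) := by push_cast; ring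
        rw [this]
        exact ih (k + 1) (by omega) hn
      · have hm : (-|pos[k]|) ∉ neg := by simpa using hc
        rw [if_pos (by simpa using hm), List.find?_cons_of_pos (by simp [hm])]
    · have hget : PySem.List.pyGet? pos (k : Int) = none := by
        rw [PySem.List.pyGet?_natCast]
        exact List.getElem?_eq_none (by omega)
      rw [hget]
      have : pos.drop k = [] := List.drop_eq_nil_of_le (by omega)
      rw [this]
      rfl

-- the symmetric branch (negatives form the strict majority)
theorem solveLoopA_neg (pos neg : List Int) (hgt : neg.length > pos.length) :
    ∀ (k n : Nat), neg.length ≤ n →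
    solveLoopA pos neg (PySem.List.pyRange (k : Int) (n : Int) 1)
      = (neg.drop k).find? (fun q => !(pos.contains |q|)) := by
  intro k n
  induction hd : n - k generalizing k with
  | zero =>
    intro hn
    have hkn : (n : Int) ≤ (k : Int) := by omega
    rw [PySem.List.pyRange_one_eq_nil hkn]
    have : neg.drop k = [] := List.drop_eq_nil_of_le (by omega)
    rw [this]
    rfl
  | succ d ih =>
    intro hn
    have hkn : (k : Int) < (n : Int) := by omega
    rw [PySem.List.pyRange_one_cons hkn]
    show (if pos.length > neg.length then _ else _) = _
    rw [if_neg (by omega), if_pos hgt]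
    by_cases hk : k < neg.length
    · have hget : PySem.List.pyGet? neg (k : Int) = some neg[k] := by
        rw [PySem.List.pyGet?_natCast]
        exact List.getElem?_eq_getElem hk
      rw [hget]
      have hdrop : neg.drop k = neg[k] :: neg.drop (k + 1) := List.drop_eq_getElem_cons hk
      rw [hdrop]
      show (if pos.contains |neg[k]| = false then some neg[k]
            else solveLoopA pos neg (PySem.List.pyRange ((k : Int) + 1) (n : Int) 1)) = _
      by_cases hc : pos.contains |neg[k]| = true
      · have hm : |neg[k]| ∈ pos := by simpa using hc
        rw [if_neg (by simp [hm]), List.find?_cons_of_neg (by simp [hm])]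
        have : ((k : Int) + 1) = ((k + 1 : Nat) : Int) := by push_cast; ring
        rw [this]
        exact ih (k + 1) (by omega) hn
      · have hm : |neg[k]| ∉ pos := by simpa using hc
        rw [if_pos (by simpa using hm), List.find?_cons_of_pos (by simp [hm])]
    · have hget : PySem.List.pyGet? neg (k : Int) = none := by
        rw [PySem.List.pyGet?_natCast]
        exact List.getElem?_eq_none (by omega)
      rw [hget]
      have : neg.drop k = [] := List.drop_eq_nil_of_le (by omega)
      rw [this]
      rfl

-- the equal-lengths branch: the loop body does nothing
theorem solveLoopA_eq (pos neg : List Int) (heq : pos.length = neg.length) :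
    ∀ (r : List Int), solveLoopA pos neg r = none := by
  intro r
  induction r with
  | nil => rfl
  | cons i rest ih =>
    show (if pos.length > neg.length then _ else _) = _
    rw [if_neg (by omega), if_neg (by omega)]
    exact ih

-- in fact the two ports agree on every input (outside Pre_ both Pythons raise, and
-- both ports return none there)
theorem contains_sorted (l : List Int) (x : Int) :
    (PySem.List.sorted l (fun y => y) false).contains x = decide (x ∈ l) := by
  by_cases h : x ∈ l <;> simp [h, PySem.List.mem_sorted]

theorem contains_ofList (l : List Int) (x : Int) :
    PySem.Set.contains (PySem.Set.ofList l) x = decide (x ∈ l) := by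
  by_cases h : x ∈ l <;> simp [PySem.Set.contains, h, PySem.Set.mem_ofList]

-- in fact the two ports agree on every input (outside Pre_ both Pythons raise, and
-- both ports return none there)
theorem solve_eq_alt (arr : List Int) : solve arr = solve_alt arr := by
  unfold solve solve_alt
  set P := arr.filter (fun x => decide (x > 0)) with hP
  set N := arr.filter (fun x => decide (x < 0)) with hN
  have hSPlen : (PySem.List.sorted P (fun x => x) false).length = P.length :=
    PySem.List.length_sorted P (fun x => x) false
  have hSNlen : (PySem.List.sorted N (fun x => x) false).length = N.length :=
    PySem.List.length_sorted N (fun x => x) false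
  have hPle : P.length ≤ arr.length := by rw [hP]; exact List.length_filter_le _ _
  have hNle : N.length ≤ arr.length := by rw [hN]; exact List.length_filter_le _ _
  by_cases h1 : P.length > N.length
  · rw [if_pos h1]
    unfold solveHalfB
    have hloop := solveLoopA_pos (PySem.List.sorted P (fun x => x) false)
      (PySem.List.sorted N (fun x => x) false) (by omega) 0 arr.length (by omega)
    simp only [Nat.cast_zero, List.drop_zero] at hloop
    rw [hloop,
      find?_congr_mem (q' := fun p => !(PySem.Set.contains (PySem.Set.ofList N) (-p))),
      find?_sorted_eq_min?_filter]
    intro x hx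
    have hxP : x ∈ P := (PySem.List.mem_sorted P (fun y => y) false x).mp hx
    have hxpos : x > 0 := by
      have := (List.mem_filter.mp (hP ▸ hxP)).2
      simpa using this
    rw [abs_of_pos hxpos, contains_sorted, contains_ofList]
  · rw [if_neg h1]
    by_cases h2 : N.length > P.length
    · rw [if_pos h2]
      unfold solveHalfB
      have hloop := solveLoopA_neg (PySem.List.sorted P (fun x => x) false)
        (PySem.List.sorted N (fun x => x) false) (by omega) 0 arr.length (by omega)
      simp only [Nat.cast_zero, List.drop_zero] at hloop
      rw [hloop,
        find?_congr_mem (q' := fun q => !(PySem.Set.contains (PySem.Set.ofList P) (-q))),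
        find?_sorted_eq_min?_filter]
      intro x hx
      have hxN : x ∈ N := (PySem.List.mem_sorted N (fun y => y) false x).mp hx
      have hxneg : x < 0 := by
        have := (List.mem_filter.mp (hN ▸ hxN)).2
        simpa using this
      rw [abs_of_neg hxneg, contains_sorted, contains_ofList]
    · rw [if_neg h2]
      exact solveLoopA_eq _ _ (by omega) _

-- ===== VERDICT (by name: the statement is the Claim_ definition above) =====
theorem solve_spec : Claim_equal_solve := by
  intro arr _ _
  unfold Spec_solve
  exact solve_eq_alt arr
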